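-- pv_equiv track=rewrite | github.com/aria1th/Torus-Hamilton-Decomposition | scripts/torus_nd_d5_slice4_transport_search_115.py | subset_field
-- ===== SOURCE A (Python) =====
-- def subset_field(x: tuple[int, int, int, int, int], m: int, subset: tuple[int, ...]):
--     z = tuple(i for i, v in enumerate(x) if v == 0)
--     mset = tuple(i for i, v in enumerate(x) if v == m - 1)
--     blocks = tuple(
--         tuple(i for i in range(5) if (x[(i - 1) % 5] + x[(i + 2) % 5]) % m == k)
--         for k in subset
--     )
--     return blocks + (z, mset)
-- ===== SOURCE B (Python) =====
-- def subset_field(x: tuple[int, int, int, int, int], m: int, subset: tuple[int, ...]):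
--     z = []
--     mset = []
--     for i, v in enumerate(x):
--         if v == 0:
--             z.append(i)
--         if v == m - 1:
--             mset.append(i)
--     blocks = []
--     if subset:
--         table = {}
--         for i in range(5):
--             r = (x[(i - 1) % 5] + x[(i + 2) % 5]) % m
--             table.setdefault(r, []).append(i)
--         blocks = [tuple(table.get(k, ())) for k in subset]
--     return tuple(blocks) + (tuple(z), tuple(mset))
-- ===== Notes on version B (the rewrite author's own statement) =====
-- stated objective: faster
-- what changed: B makes one pass over the five indices building a residue->indices dict (and one enumerate pass collecting z and mset together), so each subset element becomes an O(1) dict lookup instead of a fresh scan of range(5) with two modular index computations; the dict is only built when subset is non-empty.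
import Mathlib
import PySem

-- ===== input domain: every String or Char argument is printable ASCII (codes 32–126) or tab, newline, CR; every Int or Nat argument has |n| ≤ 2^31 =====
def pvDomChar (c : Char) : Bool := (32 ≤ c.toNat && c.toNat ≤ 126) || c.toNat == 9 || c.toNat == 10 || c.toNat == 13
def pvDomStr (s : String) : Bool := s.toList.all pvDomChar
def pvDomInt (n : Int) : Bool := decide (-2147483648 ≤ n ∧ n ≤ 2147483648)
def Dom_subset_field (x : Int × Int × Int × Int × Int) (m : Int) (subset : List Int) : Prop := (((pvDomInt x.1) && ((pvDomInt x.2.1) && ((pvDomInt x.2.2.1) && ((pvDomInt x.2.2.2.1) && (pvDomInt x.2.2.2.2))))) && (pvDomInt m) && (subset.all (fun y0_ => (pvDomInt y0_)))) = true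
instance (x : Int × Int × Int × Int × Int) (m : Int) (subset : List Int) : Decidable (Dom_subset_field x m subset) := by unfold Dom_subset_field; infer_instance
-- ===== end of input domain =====

-- B builds a residue->indices dict in one pass and replaces A's per-k scan of range(5) by a dict lookup; z and mset are collected in a single enumerate pass.

-- ===== PORT A =====
-- the tuple x as a list; Python's x[j] with the in-range index j = ... % 5 is exact list indexing (default never used)
def pvTup (x : Int × Int × Int × Int × Int) : List Int :=
  [x.1, x.2.1, x.2.2.1, x.2.2.2.1, x.2.2.2.2]

-- (x[(i - 1) % 5] + x[(i + 2) % 5]) % m, exactly as both Pythons write it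
def pvRes (x : Int × Int × Int × Int × Int) (m : Int) (i : Int) : Int :=
  PySem.Int.mod
    (PySem.List.pyGetD (pvTup x) (PySem.Int.mod (i - 1) 5) 0 +
     PySem.List.pyGetD (pvTup x) (PySem.Int.mod (i + 2) 5) 0) m

def subset_field (x : Int × Int × Int × Int × Int) (m : Int) (subset : List Int) : List (List Int) :=
  let z : List Int := ((PySem.List.enumerate (pvTup x)).filter (fun p => p.2 == 0)).map (fun p => p.1)
  let mset : List Int := ((PySem.List.enumerate (pvTup x)).filter (fun p => p.2 == m - 1)).map (fun p => p.1)
  let blocks : List (List Int) :=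
    subset.map (fun k => (PySem.List.pyRange 0 5 1).filter (fun i => pvRes x m i == k))
  blocks ++ [z, mset]

-- ===== PORT B =====
def subset_field_alt (x : Int × Int × Int × Int × Int) (m : Int) (subset : List Int) : List (List Int) :=
  let zm : List Int × List Int :=
    (PySem.List.enumerate (pvTup x)).foldl
      (fun (p : List Int × List Int) iv =>
        (if iv.2 == 0 then p.1 ++ [iv.1] else p.1,
         if iv.2 == m - 1 then p.2 ++ [iv.1] else p.2)) ([], [])
  let blocks : List (List Int) :=
    if subset.isEmpty then []
    else
      -- table.setdefault(r, []).append(i)  ≡  table[r] = table.get(r, []) + [i]  (same key positions)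
      let table : PySem.Dict Int (List Int) :=
        (PySem.List.pyRange 0 5 1).foldl
          (fun d i => d.modify (pvRes x m i) [] (fun v => v ++ [i])) PySem.Dict.empty
      subset.map (fun k => table.getD k [])
  blocks ++ [zm.1, zm.2]

-- ===== PRECONDITION & SPEC =====
-- Pre_ excludes exactly the inputs where Python A raises ZeroDivisionError: m == 0 with a non-empty subset.
def Pre_subset_field (x : Int × Int × Int × Int × Int) (m : Int) (subset : List Int) : Prop :=
  subset = [] ∨ m ≠ 0
instance (x : Int × Int × Int × Int × Int) (m : Int) (subset : List Int) : Decidable (Pre_subset_field x m subset) := by unfold Pre_subset_field; infer_instance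
def pvWitness_subset_field : (Int × Int × Int × Int × Int) × Int × List Int := ((0, 1, 2, 3, 4), 3, [0, 1, 2])

def Spec_subset_field (x : Int × Int × Int × Int × Int) (m : Int) (subset : List Int) (out : List (List Int)) : Prop := out = subset_field_alt x m subset
instance (x : Int × Int × Int × Int × Int) (m : Int) (subset : List Int) (out : List (List Int)) : Decidable (Spec_subset_field x m subset out) := by unfold Spec_subset_field; infer_instance

-- ===== CLAIM (what is proved, stated in full; the proofs are below) =====
def Claim_equal_subset_field : Prop := ∀ (x : Int × Int × Int × Int × Int) (m : Int) (subset : List Int), Dom_subset_field x m subset → Pre_subset_field x m subset → Spec_subset_field x m subset (subset_field x m subset)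

-- ===== LEMMAS AND PROOFS =====

-- B's single pass collecting z and mset equals A's two filter/map passes
theorem pv_zm_eq (m : Int) (l : List (Int × Int)) : ∀ (az am : List Int),
    l.foldl
      (fun (p : List Int × List Int) iv =>
        (if iv.2 == 0 then p.1 ++ [iv.1] else p.1,
         if iv.2 == m - 1 then p.2 ++ [iv.1] else p.2)) (az, am)
    = (az ++ (l.filter (fun p => p.2 == 0)).map (fun p => p.1),
       am ++ (l.filter (fun p => p.2 == m - 1)).map (fun p => p.1)) := by
  induction l with
  | nil => simp
  | cons hd tl ih =>
    intro az am
    simp only [List.foldl_cons, ih, List.filter_cons]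
    split_ifs <;> simp_all

-- lookup in the dict built by the grouping loop = A's filter over the index list
theorem pv_table_getD (res : Int → Int) (l : List Int) (k : Int) :
    ((l.foldl (fun (d : PySem.Dict Int (List Int)) i => d.modify (res i) [] (fun v => v ++ [i]))
        PySem.Dict.empty).getD k [])
    = l.filter (fun i => res i == k) := by
  have h : l.foldl (fun (d : PySem.Dict Int (List Int)) i => d.modify (res i) [] (fun v => v ++ [i]))
        PySem.Dict.empty
      = (l.map (fun i => (res i, i))).foldl
          (fun (d : PySem.Dict Int (List Int)) p => d.modify p.1 [] (fun v => v ++ [p.2]))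
          PySem.Dict.empty := by
    rw [List.foldl_map]
  rw [h, PySem.Dict.getD_foldl_modify_append]
  simp [List.filter_map, Function.comp_def]

-- ===== VERDICT (by name: the statement is the Claim_ definition above) =====
theorem subset_field_spec : Claim_equal_subset_field := by
  intro x m subset _ _
  unfold Spec_subset_field subset_field subset_field_alt
  simp only [pv_zm_eq, List.nil_append]
  by_cases hs : subset = []
  · simp [hs]
  · rw [if_neg (by simp [hs])]
    congr 1
    apply List.map_congr_left
    intro k _
    exact (pv_table_getD (pvRes x m) (PySem.List.pyRange 0 5 1) k).symm
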